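-- pv_equiv track=rewrite | github.com/lawrenceais/hkaidatacenter | getdata/storeDatabase.py | getTradeA
-- ===== SOURCE A (Python) =====
-- def is_integer(n):
--     try:
--         int(n)
--         return True
--     except ValueError:
--         return False
--
-- def getTradeA(ttype, stockcode, dataline):
--     startMark = ["<", ">[", "]/-//[", "]<"]
--     endMark = [">[", "]/-//[", "]<", ">"]
--     tradeMarker = ["MA","MT","AT","AA"]
--     result = []
--     for ka in range(0,4):
--         startpos = dataline.find(startMark[ka]) + len(startMark[ka])
--         endpos = dataline.find(endMark[ka],startpos)
--         datasection = dataline[startpos:endpos]       #find out the section of MA/MT/AT/AA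
--         records = datasection.split(' ')
--         markerCount = len(records)
--
--         #spacecount = datasection.count(' ')           #inside section, trade is separate by space
--         for ki in range(0,markerCount):
--             # " P107500-46.60 P301-46.60 P75000-46.60 4500-47.30 U1500-47.30 "
--
--             datasection = records[ki]
--             #startpos = datasection.find(" ",0)   #find the first space, it is starting position
--             #endpos = datasection.find(" ",1)     #find the next space
--             barpos = datasection.find("-",1)     #find the -, it is the separator of QTY-PRICE
--             if (barpos > 0):                    # if find a bar, it is transaction
--                 rType = datasection[0:1]
--                 if (is_integer(rType)):         #check for trade type
--                     rQty = datasection[0:barpos]      #if first character is a number, it is normal trade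
--                     rType = "N"
--                 else:
--                     rQty = datasection[1:barpos]
--                 rPrice = datasection[barpos+1:]
--
--                 tradeRecord = (stockcode, tradeMarker[ka], rType, rQty, rPrice)
--
--                 result.append(tradeRecord)
--
--
--     return result
-- ===== SOURCE B (Python) =====
-- def getTradeA(ttype, stockcode, dataline):
--     # Single character-level automaton per section: no split(), no per-token find('-',1),
--     # no slicing -- tokens and their QTY/PRICE parts are accumulated in one pass.
--     result = []
--     marks = [("<", ">[", "MA"), (">[", "]/-//[", "MT"),
--              ("]/-//[", "]<", "AT"), ("]<", ">", "AA")]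
--     for sm, em, marker in marks:
--         start = dataline.find(sm) + len(sm)
--         section = dataline[start:dataline.find(em, start)]
--         head, qty, price, seen = None, [], [], False
--         for c in section + ' ':          # sentinel space flushes the last token
--             if c == ' ':
--                 if seen:
--                     if head.isdigit():
--                         result.append((stockcode, marker, 'N',
--                                        head + ''.join(qty), ''.join(price)))
--                     else:
--                         result.append((stockcode, marker, head,
--                                        ''.join(qty), ''.join(price)))
--                 head, qty, price, seen = None, [], [], False
--             elif head is None:
--                 head = c
--             elif seen:
--                 price.append(c)
--             elif c == '-':
--                 seen = True
--             else:
--                 qty.append(c)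
--     return result
-- ===== Notes on version B (the rewrite author's own statement) =====
-- stated objective: alternative
-- what changed: Replaces split(' ') plus per-token find('-',1)/slicing/try-except-int with a single character-level state machine per section that accumulates head/QTY/PRICE buffers and emits a record at each space boundary.
import Mathlib
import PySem

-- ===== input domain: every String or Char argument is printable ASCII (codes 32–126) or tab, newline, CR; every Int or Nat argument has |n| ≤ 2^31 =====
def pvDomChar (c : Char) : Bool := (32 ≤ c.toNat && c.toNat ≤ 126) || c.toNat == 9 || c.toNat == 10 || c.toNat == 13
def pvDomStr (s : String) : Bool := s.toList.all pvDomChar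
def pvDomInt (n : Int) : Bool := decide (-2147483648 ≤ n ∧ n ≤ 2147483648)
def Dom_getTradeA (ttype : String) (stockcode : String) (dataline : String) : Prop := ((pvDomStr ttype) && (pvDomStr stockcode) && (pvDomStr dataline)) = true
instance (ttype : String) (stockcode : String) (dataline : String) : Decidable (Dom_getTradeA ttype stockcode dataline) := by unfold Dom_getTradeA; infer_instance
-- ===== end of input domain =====

-- B replaces A's split(' ') + per-token find('-',1)/slicing/try-except-int parsing by a single
-- character-level state machine per section that accumulates head/QTY/PRICE buffers and emits a
-- record at each space boundary.

-- ===== PORT A =====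
-- is_integer(n): int(n) succeeds (PySem.Int.ofStr? none = ValueError)
def isInteger (n : String) : Bool := (PySem.Int.ofStr? n).isSome

def getTradeA (ttype : String) (stockcode : String) (dataline : String) : List (String × String × String × String × String) :=
  let startMark : List String := ["<", ">[", "]/-//[", "]<"]
  let endMark : List String := [">[", "]/-//[", "]<", ">"]
  let tradeMarker : List String := ["MA", "MT", "AT", "AA"]
  (PySem.List.pyRange 0 4).foldl (fun result ka =>
    let sm := PySem.List.pyGetD startMark ka ""
    let em := PySem.List.pyGetD endMark ka ""
    let startpos : Int := PySem.Str.find dataline sm + PySem.Str.len sm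
    let endpos : Int := PySem.Str.findFrom dataline em startpos
    let datasection : String := PySem.Str.slice dataline (some startpos) (some endpos)
    let records : List String := (PySem.Str.split? datasection " ").getD []   -- sep ≠ "": split? is never none
    let markerCount : Int := records.length
    (PySem.List.pyRange 0 markerCount).foldl (fun result ki =>
      let ds := PySem.List.pyGetD records ki ""
      let barpos : Int := PySem.Str.findFrom ds "-" 1
      if barpos > 0 then
        let rType := PySem.Str.slice ds (some 0) (some 1)
        if isInteger rType then
          result ++ [(stockcode, PySem.List.pyGetD tradeMarker ka "", "N",
                      PySem.Str.slice ds (some 0) (some barpos),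
                      PySem.Str.slice ds (some (barpos + 1)) none)]
        else
          result ++ [(stockcode, PySem.List.pyGetD tradeMarker ka "", rType,
                      PySem.Str.slice ds (some 1) (some barpos),
                      PySem.Str.slice ds (some (barpos + 1)) none)]
      else result) result) []

-- ===== PORT B =====
-- flush of one token: head = first char (none while no char read), qty/price the two buffers,
-- seen = a separator '-' was met; the 'none' head branch is unreachable (seen implies a head
-- was read) and only totalizes the Python attribute access head.isdigit().
def pvFlush (stockcode marker : String) (head : Option Char) (qty price : List Char) (seen : Bool) :
    List (String × String × String × String × String) :=
  if seen then
    match head with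
    | some h =>
      if PySem.Chars.isdigit h then
        [(stockcode, marker, "N", String.ofList (h :: qty), String.ofList price)]
      else
        [(stockcode, marker, String.ofList [h], String.ofList qty, String.ofList price)]
    | none => []
  else []

-- one automaton step: the loop body of Source B's `for c in section + ' '`
def pvStep (stockcode marker : String)
    (st : (Option Char × List Char × List Char × Bool) × List (String × String × String × String × String))
    (c : Char) : (Option Char × List Char × List Char × Bool) × List (String × String × String × String × String) :=
  if c = ' ' then
    ((none, [], [], false), st.2 ++ pvFlush stockcode marker st.1.1 st.1.2.1 st.1.2.2.1 st.1.2.2.2)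
  else
    match st.1.1 with
    | none => ((some c, st.1.2.1, st.1.2.2.1, st.1.2.2.2), st.2)
    | some h =>
      if st.1.2.2.2 then ((some h, st.1.2.1, st.1.2.2.1 ++ [c], true), st.2)
      else if c = '-' then ((some h, st.1.2.1, st.1.2.2.1, true), st.2)
      else ((some h, st.1.2.1 ++ [c], st.1.2.2.1, st.1.2.2.2), st.2)

def getTradeA_alt (ttype : String) (stockcode : String) (dataline : String) : List (String × String × String × String × String) :=
  let marks : List (String × String × String) :=
    [("<", ">[", "MA"), (">[", "]/-//[", "MT"), ("]/-//[", "]<", "AT"), ("]<", ">", "AA")]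
  marks.foldl (fun result m =>
    let start : Int := PySem.Str.find dataline m.1 + PySem.Str.len m.1
    let sect : String := PySem.Str.slice dataline (some start) (some (PySem.Str.findFrom dataline m.2.1 start))
    ((sect.toList ++ [' ']).foldl (pvStep stockcode m.2.2) ((none, [], [], false), result)).2) []

-- ===== PRECONDITION & SPEC =====
def Spec_getTradeA (ttype : String) (stockcode : String) (dataline : String) (out : List (String × String × String × String × String)) : Prop := out = getTradeA_alt ttype stockcode dataline
instance (ttype : String) (stockcode : String) (dataline : String) (out : List (String × String × String × String × String)) : Decidable (Spec_getTradeA ttype stockcode dataline out) := by unfold Spec_getTradeA; infer_instance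

-- ===== CLAIM (what is proved, stated in full; the proofs are below) =====
def Claim_equal_getTradeA : Prop := ∀ (ttype : String) (stockcode : String) (dataline : String), Dom_getTradeA ttype stockcode dataline → Spec_getTradeA ttype stockcode dataline (getTradeA ttype stockcode dataline)

-- ===== LEMMAS AND PROOFS =====

-- cut a char list at its FIRST '-'
def pvCut : List Char → List Char × Option (List Char)
  | [] => ([], none)
  | c :: r => if c = '-' then ([], some r) else ((c :: (pvCut r).1), (pvCut r).2)

-- the automaton state reached after reading exactly the chars of one partial token
def pvStateOf : List Char → Option Char × List Char × List Char × Bool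
  | [] => (none, [], [], false)
  | h :: rest =>
    match (pvCut rest).2 with
    | none => (some h, (pvCut rest).1, [], false)
    | some p => (some h, (pvCut rest).1, p, true)

def pvFlushTok (stockcode marker : String) (pt : List Char) : List (String × String × String × String × String) :=
  pvFlush stockcode marker (pvStateOf pt).1 (pvStateOf pt).2.1 (pvStateOf pt).2.2.1 (pvStateOf pt).2.2.2

-- split at spaces, recursively (specification-side mirror of str.split(' '))
def pvSplit : List Char → List (List Char)
  | [] => [[]]
  | c :: r => if c = ' ' then [] :: pvSplit r else
      match pvSplit r with
      | t :: ts => (c :: t) :: ts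
      | [] => [[c]]

-- token-at-a-time processing of a section with a partial token already read
def pvProc (f : List Char → List (String × String × String × String × String)) :
    List Char → List Char → List (String × String × String × String × String)
  | pt, [] => f pt
  | pt, c :: r => if c = ' ' then f pt ++ pvProc f [] r else pvProc f (pt ++ [c]) r

lemma pvSplit_ne_nil (cs : List Char) : pvSplit cs ≠ [] := by
  cases cs with
  | nil => simp [pvSplit]
  | cons c r =>
    simp only [pvSplit]
    split_ifs
    · simp
    · match h : pvSplit r with
      | [] => simp
      | t :: ts => simp

lemma pvSplit_headI_tail (cs : List Char) : (pvSplit cs).headI :: (pvSplit cs).tail = pvSplit cs := by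
  match h : pvSplit cs with
  | [] => exact absurd h (pvSplit_ne_nil cs)
  | t :: ts => simp

-- chars of any piece of pvSplit come from the input
lemma pvSplit_chars (cs : List Char) : ∀ t ∈ pvSplit cs, ∀ c ∈ t, c ∈ cs := by
  induction cs with
  | nil => intro t ht c hc; simp [pvSplit] at ht; simp [ht] at hc
  | cons x r ih =>
    intro t ht c hc
    simp only [pvSplit] at ht
    split_ifs at ht
    · rcases List.mem_cons.mp ht with h | h
      · simp [h] at hc
      · exact List.mem_cons_of_mem _ (ih t h c hc)
    · match hsp : pvSplit r with
      | [] => exact absurd hsp (pvSplit_ne_nil r)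
      | t0 :: ts =>
        rw [hsp] at ht
        rcases List.mem_cons.mp ht with h | h
        · subst h
          rcases List.mem_cons.mp hc with h | h
          · exact h ▸ List.mem_cons_self
          · exact List.mem_cons_of_mem _ (ih t0 (hsp ▸ List.mem_cons_self) c h)
        · exact List.mem_cons_of_mem _ (ih t (hsp ▸ List.mem_cons_of_mem _ h) c hc)

-- PySem's fuel-based splitOn with the single-char separator ' ' is pvSplit
lemma splitOn_go_space (l : List Char) : ∀ (fuel : Nat) (cur : List Char) (acc : List (List Char)),
    l.length ≤ fuel →
    PySem.Chars.splitOn.go [' '] fuel l cur acc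
      = acc.reverse ++ (cur.reverse ++ (pvSplit l).headI) :: (pvSplit l).tail := by
  induction l with
  | nil =>
    intro fuel cur acc _
    cases fuel with
    | zero => rw [PySem.Chars.splitOn.go]; simp [pvSplit]
    | succ n =>
      rw [PySem.Chars.splitOn.go]
      · simp [pvSplit]
      · omega
  | cons x r ih =>
    intro fuel cur acc hf
    cases fuel with
    | zero => simp at hf
    | succ n =>
      rw [PySem.Chars.splitOn.go]
      by_cases hx : x = ' '
      · have hp : List.isPrefixOf [' '] (x :: r) = true := by
          subst hx; simp [List.isPrefixOf]
        rw [if_pos hp, show List.drop [' '].length (x :: r) = r from rfl]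
        rw [ih n [] (cur.reverse :: acc) (by simp at hf; omega)]
        simp only [pvSplit, if_pos hx, List.reverse_cons, List.reverse_nil, List.nil_append,
                   List.length_cons] at *
        simp [pvSplit_headI_tail r, List.append_assoc]
      · have hp : List.isPrefixOf [' '] (x :: r) = false := by
          simp [List.isPrefixOf]
          intro h; exact absurd h.symm hx
        rw [if_neg (by simp [hp])]
        rw [ih n (x :: cur) acc (by simp at hf; omega)]
        have : pvSplit (x :: r) = (x :: (pvSplit r).headI) :: (pvSplit r).tail := by
          simp only [pvSplit, if_neg hx]
          match h : pvSplit r with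
          | [] => exact absurd h (pvSplit_ne_nil r)
          | t :: ts => simp
        rw [this]
        simp [List.append_assoc]

lemma splitOn_space (cs : List Char) : PySem.Chars.splitOn cs [' '] = pvSplit cs := by
  unfold PySem.Chars.splitOn
  rw [splitOn_go_space cs (cs.length + 1) [] [] (by omega)]
  simpa using pvSplit_headI_tail cs

-- pvCut against CPython's find('-'): either no '-' at all, or l = q ++ '-' :: p with find = k + |q|
lemma cut_go (l : List Char) : ∀ k : Nat,
    ((pvCut l).2 = none ∧ PySem.Chars.find.go ['-'] l k = -1 ∧ (pvCut l).1 = l)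
    ∨ ∃ p, (pvCut l).2 = some p ∧ PySem.Chars.find.go ['-'] l k = (k : Int) + (pvCut l).1.length
        ∧ l = (pvCut l).1 ++ '-' :: p := by
  induction l with
  | nil => intro k; left; rw [PySem.Chars.find.go]; simp [pvCut]
  | cons x r ih =>
    intro k
    rw [PySem.Chars.find.go]
    by_cases hx : x = '-'
    · right
      subst hx
      have hp : List.isPrefixOf ['-'] ('-' :: r) = true := by simp [List.isPrefixOf]
      exact ⟨r, by simp [pvCut], by simp [hp, pvCut], by simp [pvCut]⟩
    · have hp : List.isPrefixOf ['-'] (x :: r) = false := by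
        simp [List.isPrefixOf]; intro h; exact absurd h.symm hx
      rw [if_neg (by simp [hp])]
      rcases ih (k + 1) with ⟨h1, h2, h3⟩ | ⟨p, h1, h2, h3⟩
      · left
        refine ⟨by simp [pvCut, hx, h1], h2, by simp [pvCut, hx, h3]⟩
      · right
        refine ⟨p, by simp [pvCut, hx, h1], ?_, by simp only [pvCut, if_neg hx]; simpa using h3⟩
        rw [h2]
        simp [pvCut, hx]
        push_cast
        ring

-- appending one char to the partial token, on the cut level
lemma cut_append (r : List Char) (c : Char) :
    pvCut (r ++ [c]) = match (pvCut r).2 with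
      | some p => ((pvCut r).1, some (p ++ [c]))
      | none => if c = '-' then ((pvCut r).1, some []) else ((pvCut r).1 ++ [c], none) := by
  induction r with
  | nil => by_cases hc : c = '-' <;> simp [pvCut, hc]
  | cons x r ih =>
    by_cases hx : x = '-'
    · simp [pvCut, hx]
    · match h : (pvCut r).2 with
      | some p => simp only [List.cons_append, pvCut, if_neg hx, ih, h]
      | none =>
        by_cases hc : c = '-'
        · subst hc
          simp [pvCut, hx, ih, h]
        · simp [pvCut, hx, ih, h, hc]

-- a non-space char advances the automaton from the state of pt to the state of pt ++ [c]
lemma step_nonspace (sc mk : String) (pt : List Char) (res : List (String × String × String × String × String))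
    (c : Char) (hc : c ≠ ' ') :
    pvStep sc mk (pvStateOf pt, res) c = (pvStateOf (pt ++ [c]), res) := by
  cases pt with
  | nil =>
    by_cases hd : c = '-' <;> simp [pvStep, pvStateOf, pvCut, hc, hd]
  | cons h rest =>
    match hcr : (pvCut rest).2 with
    | none =>
      by_cases hd : c = '-' <;>
        simp [pvStep, pvStateOf, hc, hcr, cut_append, hd]
    | some p =>
      simp [pvStep, pvStateOf, hc, hcr, cut_append]

lemma step_space (sc mk : String) (pt : List Char) (res : List (String × String × String × String × String)) :
    pvStep sc mk (pvStateOf pt, res) ' ' = (pvStateOf [], res ++ pvFlushTok sc mk pt) := by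
  simp [pvStep, pvFlushTok, pvStateOf]

-- running the automaton over cs ++ [' '] from the state of a partial token
lemma run_auto (sc mk : String) (cs : List Char) : ∀ (pt : List Char) (res : List (String × String × String × String × String)),
    (cs ++ [' ']).foldl (pvStep sc mk) (pvStateOf pt, res)
      = (pvStateOf [], res ++ pvProc (pvFlushTok sc mk) pt cs) := by
  induction cs with
  | nil => intro pt res; simpa [pvProc] using step_space sc mk pt res
  | cons c r ih =>
    intro pt res
    by_cases hc : c = ' '
    · subst hc
      rw [List.cons_append, List.foldl_cons, step_space, ih [] (res ++ pvFlushTok sc mk pt)]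
      simp [pvProc]
    · rw [List.cons_append, List.foldl_cons, step_nonspace sc mk pt res c hc, ih (pt ++ [c]) res]
      simp [pvProc, hc]

-- token-at-a-time processing is the flatMap of the flush over the split tokens
lemma proc_flatMap (f : List Char → List (String × String × String × String × String)) (cs : List Char) :
    ∀ pt, pvProc f pt cs = ((pt ++ (pvSplit cs).headI) :: (pvSplit cs).tail).flatMap f := by
  induction cs with
  | nil => intro pt; simp [pvProc, pvSplit]
  | cons c r ih =>
    intro pt
    by_cases hc : c = ' '
    · subst hc
      rw [show pvProc f pt (' ' :: r) = f pt ++ pvProc f [] r from by simp [pvProc]]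
      rw [ih []]
      rw [show pvSplit (' ' :: r) = [] :: pvSplit r from by simp [pvSplit]]
      simp only [List.headI_cons, List.tail_cons, List.nil_append]
      rw [pvSplit_headI_tail r]
      simp
    · rw [show pvProc f pt (c :: r) = pvProc f (pt ++ [c]) r from by simp [pvProc, hc]]
      rw [ih (pt ++ [c])]
      have : pvSplit (c :: r) = (c :: (pvSplit r).headI) :: (pvSplit r).tail := by
        simp only [pvSplit, if_neg hc]
        match h : pvSplit r with
        | [] => exact absurd h (pvSplit_ne_nil r)
        | t :: ts => simp
      rw [this]
      simp

-- On any printable-ASCII/tab/newline char, int(c) succeeds exactly when c is a decimal digit.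
lemma isInteger_single (c : Char) (h : pvDomChar c = true) :
    (PySem.Int.ofChars? [c]).isSome = PySem.Chars.isdigit c := by
  have hb : c.toNat < 127 := by
    simp [pvDomChar] at h
    omega
  have key : ∀ n : Nat, n < 127 →
      (PySem.Int.ofChars? [Char.ofNat n]).isSome = PySem.Chars.isdigit (Char.ofNat n) := by decide
  have := key c.toNat hb
  rwa [Char.ofNat_toNat] at this

-- per-token: A's classify-and-slice equals the flush of B's automaton state after the token
lemma records_eq (stockcode marker tok : String)
    (hdom : ∀ c ∈ tok.toList, pvDomChar c = true) :
    (let barpos : Int := PySem.Str.findFrom tok "-" 1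
     if barpos > 0 then
       (let rType := PySem.Str.slice tok (some 0) (some 1)
        if isInteger rType then
          [(stockcode, marker, "N", PySem.Str.slice tok (some 0) (some barpos),
            PySem.Str.slice tok (some (barpos + 1)) none)]
        else
          [(stockcode, marker, rType, PySem.Str.slice tok (some 1) (some barpos),
            PySem.Str.slice tok (some (barpos + 1)) none)])
     else []) = pvFlushTok stockcode marker tok.toList := by
  simp only [PySem.Str.findFrom_eq]
  have hdash : ("-" : String).toList = ['-'] := rfl
  match hcs : tok.toList with
  | [] =>
    simp [PySem.Chars.findFrom, PySem.Chars.find, PySem.Chars.find.go, pvFlushTok, pvStateOf, pvFlush]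
  | c :: rest =>
    rw [hdash]
    have hff : PySem.Chars.findFrom (c :: rest) ['-'] 1 none =
        (if PySem.Chars.find rest ['-'] = -1 then -1 else 1 + PySem.Chars.find rest ['-']) := by
      simp [PySem.Chars.findFrom]
    rw [hff]
    rcases cut_go rest 0 with ⟨h1, h2, _⟩ | ⟨p, h1, h2, h3⟩
    · -- no separator: no record on either side
      rw [show PySem.Chars.find rest ['-'] = -1 from h2]
      rw [if_pos rfl, if_neg (by omega)]
      simp [pvFlushTok, pvStateOf, h1, pvFlush]
    · -- rest = q ++ '-' :: p
      set q := (pvCut rest).1 with hq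
      have hfind : PySem.Chars.find rest ['-'] = (q.length : Int) := by simpa using h2
      rw [hfind]
      rw [if_neg (show ¬((q.length : Int) = -1) by omega)]
      rw [if_pos (show (1 : Int) + (q.length : Int) > 0 by omega)]
      have hhead : PySem.Str.slice tok (some 0) (some 1) = String.ofList [c] := by
        apply String.toList_inj.mp
        rw [PySem.Str.toList_slice, PySem.Chars.slice_eq_listSlice, hcs,
            PySem.List.slice_zero_start, PySem.List.slice_to _ (by omega : (0:Int) ≤ 1),
            String.toList_ofList]
        norm_num
      have hone : (1 : Int) + (q.length : Int) = ((1 + q.length : Nat) : Int) := by push_cast; ring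
      have hq1 : PySem.Str.slice tok (some 0) (some (1 + (q.length : Int))) = String.ofList (c :: q) := by
        apply String.toList_inj.mp
        rw [PySem.Str.toList_slice, PySem.Chars.slice_eq_listSlice, hcs,
            PySem.List.slice_zero_start, hone, PySem.List.slice_to_natCast,
            String.toList_ofList, h3]
        rw [Nat.add_comm 1 q.length, List.take_succ_cons, List.take_left]
      have hq2 : PySem.Str.slice tok (some 1) (some (1 + (q.length : Int))) = String.ofList q := by
        apply String.toList_inj.mp
        rw [PySem.Str.toList_slice, PySem.Chars.slice_eq_listSlice, hcs, hone,
            show (1 : Int) = ((1 : Nat) : Int) from rfl, PySem.List.slice_natCast,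
            String.toList_ofList, h3]
        simp [List.take_left]
      have hp : PySem.Str.slice tok (some (1 + (q.length : Int) + 1)) none = String.ofList p := by
        apply String.toList_inj.mp
        have h2' : (1 + (q.length : Int) + 1) = (((c :: q).length + 1 : Nat) : Int) := by
          simp; omega
        rw [PySem.Str.toList_slice, PySem.Chars.slice_eq_listSlice, hcs, h2',
            PySem.List.slice_from_natCast, String.toList_ofList, h3,
            show c :: (q ++ '-' :: p) = (c :: q) ++ ('-' :: p) from by simp,
            List.drop_length_add_append]
        rfl
      have hcond : isInteger (PySem.Str.slice tok (some 0) (some 1)) = PySem.Chars.isdigit c := by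
        rw [hhead]
        have hc : pvDomChar c = true := hdom c (by rw [hcs]; exact List.mem_cons_self)
        rw [show isInteger (String.ofList [c]) = (PySem.Int.ofChars? [c]).isSome from by
              simp [isInteger, PySem.Int.ofStr?_ofList]]
        exact isInteger_single c hc
      rw [hcond, hhead, hq1, hq2, hp]
      simp only [pvFlushTok, pvStateOf, h1, pvFlush, if_pos]
      by_cases hdg : PySem.Chars.isdigit c <;> simp [hdg, ← hq]

-- chars of each split token of a section are chars of the section
lemma token_chars (sec : String) (t : List Char)
    (hdom : ∀ c ∈ sec.toList, pvDomChar c = true)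
    (ht : t ∈ pvSplit sec.toList) :
    ∀ c ∈ t, pvDomChar c = true :=
  fun c hc => hdom c (pvSplit_chars sec.toList t ht c hc)

-- per-section: A's split-and-index inner loop equals one run of B's automaton
lemma inner_eq (stockcode marker sec : String) (res : List (String × String × String × String × String))
    (hdom : ∀ c ∈ sec.toList, pvDomChar c = true) :
    (PySem.List.pyRange 0 (((PySem.Str.split? sec " ").getD []).length : Int)).foldl (fun result ki =>
      if PySem.Str.findFrom (PySem.List.pyGetD ((PySem.Str.split? sec " ").getD []) ki "") "-" 1 > 0 then
        if isInteger (PySem.Str.slice (PySem.List.pyGetD ((PySem.Str.split? sec " ").getD []) ki "") (some 0) (some 1)) then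
          result ++ [(stockcode, marker, "N",
                      PySem.Str.slice (PySem.List.pyGetD ((PySem.Str.split? sec " ").getD []) ki "") (some 0)
                        (some (PySem.Str.findFrom (PySem.List.pyGetD ((PySem.Str.split? sec " ").getD []) ki "") "-" 1)),
                      PySem.Str.slice (PySem.List.pyGetD ((PySem.Str.split? sec " ").getD []) ki "")
                        (some (PySem.Str.findFrom (PySem.List.pyGetD ((PySem.Str.split? sec " ").getD []) ki "") "-" 1 + 1)) none)]
        else
          result ++ [(stockcode, marker,
                      PySem.Str.slice (PySem.List.pyGetD ((PySem.Str.split? sec " ").getD []) ki "") (some 0) (some 1),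
                      PySem.Str.slice (PySem.List.pyGetD ((PySem.Str.split? sec " ").getD []) ki "") (some 1)
                        (some (PySem.Str.findFrom (PySem.List.pyGetD ((PySem.Str.split? sec " ").getD []) ki "") "-" 1)),
                      PySem.Str.slice (PySem.List.pyGetD ((PySem.Str.split? sec " ").getD []) ki "")
                        (some (PySem.Str.findFrom (PySem.List.pyGetD ((PySem.Str.split? sec " ").getD []) ki "") "-" 1 + 1)) none)]
      else result) res
    = ((sec.toList ++ [' ']).foldl (pvStep stockcode marker) ((none, [], [], false), res)).2 := by
  have hsplit : (PySem.Str.split? sec " ").getD [] = (pvSplit sec.toList).map String.ofList := by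
    simp [PySem.Str.split?, PySem.Chars.split?, splitOn_space]
  rw [PySem.List.foldl_pyRange_zero_pyGetD' ((PySem.Str.split? sec " ").getD []) ""
      (fun result ds =>
        if PySem.Str.findFrom ds "-" 1 > 0 then
          if isInteger (PySem.Str.slice ds (some 0) (some 1)) = true then
            result ++ [(stockcode, marker, "N",
                        PySem.Str.slice ds (some 0) (some (PySem.Str.findFrom ds "-" 1)),
                        PySem.Str.slice ds (some (PySem.Str.findFrom ds "-" 1 + 1)) none)]
          else
            result ++ [(stockcode, marker, PySem.Str.slice ds (some 0) (some 1),
                        PySem.Str.slice ds (some 1) (some (PySem.Str.findFrom ds "-" 1)),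
                        PySem.Str.slice ds (some (PySem.Str.findFrom ds "-" 1 + 1)) none)]
        else result) res]
  rw [PySem.List.foldl_congr_mem _ _ (fun res tok => res ++ pvFlushTok stockcode marker tok.toList) _
      (by
        intro acc tok htok
        show _ = acc ++ pvFlushTok stockcode marker tok.toList
        have hchars : ∀ c ∈ tok.toList, pvDomChar c = true := by
          rw [hsplit] at htok
          rcases List.mem_map.mp htok with ⟨u, hu, he⟩
          subst he
          rw [String.toList_ofList]
          exact token_chars sec u hdom hu
        rw [← records_eq stockcode marker tok hchars]
        dsimp only
        split_ifs <;> simp)]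
  rw [PySem.List.foldl_append_eq_flatMap]
  rw [hsplit, List.flatMap_map]
  have hrun := run_auto stockcode marker sec.toList [] res
  rw [proc_flatMap, List.nil_append, pvSplit_headI_tail] at hrun
  simp only [String.toList_ofList]
  rw [show ((none, [], [], false) : Option Char × List Char × List Char × Bool) = pvStateOf [] from rfl, hrun]

-- ===== VERDICT (by name: the statement is the Claim_ definition above) =====
theorem getTradeA_spec : Claim_equal_getTradeA := by
  intro ttype stockcode dataline hdom
  have hd : ∀ c ∈ dataline.toList, pvDomChar c = true := by
    have h : pvDomStr dataline = true := by
      unfold Dom_getTradeA at hdom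
      simp only [Bool.and_eq_true] at hdom
      exact hdom.2
    simpa [pvDomStr, List.all_eq_true] using h
  unfold Spec_getTradeA getTradeA getTradeA_alt
  rw [show PySem.List.pyRange 0 4 = [0, 1, 2, 3] from by decide]
  simp only [List.foldl_cons, List.foldl_nil]
  simp only [show PySem.List.pyGetD ["<", ">[", "]/-//[", "]<"] (0 : Int) "" = "<" from rfl,
             show PySem.List.pyGetD ["<", ">[", "]/-//[", "]<"] (1 : Int) "" = ">[" from rfl,
             show PySem.List.pyGetD ["<", ">[", "]/-//[", "]<"] (2 : Int) "" = "]/-//[" from rfl,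
             show PySem.List.pyGetD ["<", ">[", "]/-//[", "]<"] (3 : Int) "" = "]<" from rfl,
             show PySem.List.pyGetD [">[", "]/-//[", "]<", ">"] (0 : Int) "" = ">[" from rfl,
             show PySem.List.pyGetD [">[", "]/-//[", "]<", ">"] (1 : Int) "" = "]/-//[" from rfl,
             show PySem.List.pyGetD [">[", "]/-//[", "]<", ">"] (2 : Int) "" = "]<" from rfl,
             show PySem.List.pyGetD [">[", "]/-//[", "]<", ">"] (3 : Int) "" = ">" from rfl,
             show PySem.List.pyGetD ["MA", "MT", "AT", "AA"] (0 : Int) "" = "MA" from rfl,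
             show PySem.List.pyGetD ["MA", "MT", "AT", "AA"] (1 : Int) "" = "MT" from rfl,
             show PySem.List.pyGetD ["MA", "MT", "AT", "AA"] (2 : Int) "" = "AT" from rfl,
             show PySem.List.pyGetD ["MA", "MT", "AT", "AA"] (3 : Int) "" = "AA" from rfl]
  rw [inner_eq stockcode "MA", inner_eq stockcode "MT", inner_eq stockcode "AT",
      inner_eq stockcode "AA"]
  all_goals
    intro c hc
    rw [PySem.Str.toList_slice, PySem.Chars.slice_eq_listSlice] at hc
    exact hd c (PySem.List.mem_of_mem_slice _ _ _ hc)
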